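-- pv_equiv track=rewrite | github.com/schlitzered/pyppetdb | pyppetdb/crud/mixins.py | _projection
-- ===== SOURCE A (Python) =====
-- def _projection(fields: list | None):
--     if not fields:
--         return None
--     fields.sort()
--     _fields = []
--     for field in fields:
--         if not any(field.startswith(parent + ".") for parent in _fields):
--             _fields.append(field)
--     result = {}
--     for field in _fields:
--         result[field] = 1
--     return result
-- ===== SOURCE B (Python) =====
-- def _projection(fields: list | None):
--     if not fields:
--         return None
--     fields.sort()
--     kept = set()
--     result = {}
--     for field in fields:
--         prefix = ""
--         blocked = False
--         for ch in field:
--             if ch == "." and prefix in kept: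
--                 blocked = True
--                 break
--             prefix += ch
--         if not blocked:
--             kept.add(field)
--             result[field] = 1
--     return result
-- ===== Notes on version B (the rewrite author's own statement) =====
-- stated objective: faster
-- what changed: A tests each field against every already-kept field with startswith (O(kept) scans); B makes one left-to-right pass over the field's characters, checking each dot-boundary prefix for membership in a set of kept fields.
import Mathlib
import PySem

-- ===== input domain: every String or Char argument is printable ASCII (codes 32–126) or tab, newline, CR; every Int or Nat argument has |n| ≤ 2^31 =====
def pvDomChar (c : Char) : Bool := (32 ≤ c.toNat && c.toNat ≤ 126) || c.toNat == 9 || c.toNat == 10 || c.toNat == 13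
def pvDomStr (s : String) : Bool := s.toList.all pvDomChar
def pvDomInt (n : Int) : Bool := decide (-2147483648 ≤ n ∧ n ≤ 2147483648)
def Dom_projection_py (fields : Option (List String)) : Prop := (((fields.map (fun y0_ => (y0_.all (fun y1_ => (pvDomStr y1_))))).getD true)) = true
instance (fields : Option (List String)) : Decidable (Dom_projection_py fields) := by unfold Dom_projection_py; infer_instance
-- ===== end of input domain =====

-- B replaces A's inner scan of all already-kept fields by a single left-to-right pass
-- over the field's characters, testing each dot-boundary prefix for membership in a set
-- of kept fields. Return-value equivalence only: A sorts its list argument in place and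
-- B performs the same in-place sort.

-- ===== PORT A =====
-- step of A's first loop: keep `field` unless some already-kept `parent` satisfies field.startswith(parent + ".")
def pvStepA (acc : List String) (field : String) : List String :=
  if acc.any (fun parent => PySem.Str.startswith field (parent ++ ".")) then acc
  else acc ++ [field]

def projection_py (fields : Option (List String)) : Option (List (String × Int)) :=
  match fields with
  | none => none
  | some fs =>
    if fs.isEmpty then none
    else
      let sortedFields := PySem.List.sorted fs (fun x => x) false
      let keptFields := sortedFields.foldl pvStepA []
      some ((keptFields.foldl (fun d f => d.insert f 1)
              (PySem.Dict.empty : PySem.Dict String Int)).items)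

-- ===== PORT B =====
-- B's inner loop: walk the characters, accumulating the prefix seen so far; at each '.'
-- test whether that prefix is an already-kept field (Python's `break` = returning true).
def pvHasKeptAncestor (kept : PySem.Set String) (pre : List Char) : List Char → Bool
  | [] => false
  | c :: rest =>
    if c == '.' && kept.contains (String.ofList pre) then true
    else pvHasKeptAncestor kept (pre ++ [c]) rest

-- step of B's single loop: state = (set of kept fields, result dict)
def pvStepB (st : PySem.Set String × PySem.Dict String Int) (field : String) :
    PySem.Set String × PySem.Dict String Int :=
  if pvHasKeptAncestor st.1 [] field.toList then st
  else (st.1.add field, st.2.insert field 1)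

def projection_py_alt (fields : Option (List String)) : Option (List (String × Int)) :=
  match fields with
  | none => none
  | some fs =>
    if fs.isEmpty then none
    else
      let st := (PySem.List.sorted fs (fun x => x) false).foldl pvStepB
                  (PySem.Set.empty, PySem.Dict.empty)
      some st.2.items

-- ===== PRECONDITION & SPEC =====
def Spec_projection_py (fields : Option (List String)) (out : Option (List (String × Int))) : Prop := out = projection_py_alt fields
instance (fields : Option (List String)) (out : Option (List (String × Int))) : Decidable (Spec_projection_py fields out) := by unfold Spec_projection_py; infer_instance

-- ===== CLAIM (what is proved, stated in full; the proofs are below) =====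
def Claim_equal_projection_py : Prop := ∀ (fields : Option (List String)), Dom_projection_py fields → Spec_projection_py fields (projection_py fields)

-- ===== LEMMAS AND PROOFS =====

-- B's inner loop returns true iff the field splits at some '.' whose left part (with the
-- accumulated prefix in front) is a kept field.
theorem pvHasKeptAncestor_iff (kept : PySem.Set String) (cs : List Char) :
    ∀ pre : List Char, pvHasKeptAncestor kept pre cs = true ↔
      ∃ a b, cs = a ++ '.' :: b ∧ String.ofList (pre ++ a) ∈ kept := by
  induction cs with
  | nil =>
    intro pre
    simp [pvHasKeptAncestor]
  | cons c rest ih =>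
    intro pre
    simp only [pvHasKeptAncestor]
    by_cases h : c = '.' ∧ String.ofList pre ∈ kept
    · rw [if_pos (by simp [h.1, h.2])]
      constructor
      · intro _
        exact ⟨[], rest, by simp [h.1], by simpa using h.2⟩
      · intro _; rfl
    · rw [if_neg (by
        intro hb
        simp only [Bool.and_eq_true, beq_iff_eq, PySem.Set.contains_iff] at hb
        exact h hb)]
      rw [ih (pre ++ [c])]
      constructor
      · rintro ⟨a, b, hab, hmem⟩
        exact ⟨c :: a, b, by simp [hab], by simpa using hmem⟩
      · rintro ⟨a, b, hab, hmem⟩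
        cases a with
        | nil =>
          exfalso
          apply h
          refine ⟨?_, ?_⟩
          · simpa using congrArg (fun l => l.head?) hab
          · have : c :: rest = '.' :: b := by simpa using hab
            simpa using hmem
        | cons a0 a' =>
          have h0 : c = a0 ∧ rest = a' ++ '.' :: b := by
            constructor
            · simpa using congrArg (fun l => l.head?) hab
            · simpa using congrArg List.tail hab
          exact ⟨a', b, h0.2, by simpa [h0.1] using hmem⟩

-- A's inner scan returns true iff the field splits at some '.' whose left part is a kept field.
theorem pvCondA_iff (KL : List String) (field : String) :
    (KL.any (fun parent => PySem.Str.startswith field (parent ++ "."))) = true ↔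
      ∃ a b, field.toList = a ++ '.' :: b ∧ String.ofList a ∈ KL := by
  rw [List.any_eq_true]
  constructor
  · rintro ⟨parent, hmem, hsw⟩
    rw [PySem.Str.startswith_eq, PySem.Chars.startswith_iff] at hsw
    obtain ⟨t, ht⟩ := hsw
    refine ⟨parent.toList, t, ?_, ?_⟩
    · rw [← ht]; simp
    · simpa using hmem
  · rintro ⟨a, b, hab, hmem⟩
    refine ⟨String.ofList a, hmem, ?_⟩
    rw [PySem.Str.startswith_eq, PySem.Chars.startswith_iff]
    exact ⟨b, by simp [hab]⟩

-- the two keep-conditions agree whenever the kept set and A's kept list have the same members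
theorem pvCond_eq (S : PySem.Set String) (KL : List String)
    (h : ∀ x, x ∈ S ↔ x ∈ KL) (field : String) :
    pvHasKeptAncestor S [] field.toList =
      (KL.any (fun parent => PySem.Str.startswith field (parent ++ "."))) := by
  rw [Bool.eq_iff_iff, pvHasKeptAncestor_iff, pvCondA_iff]
  constructor
  · rintro ⟨a, b, hab, hmem⟩
    exact ⟨a, b, hab, (h _).mp (by simpa using hmem)⟩
  · rintro ⟨a, b, hab, hmem⟩
    exact ⟨a, b, hab, by simpa using (h _).mpr hmem⟩

-- main loop invariant: B's dict equals the dict A would build from its kept list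
theorem pvLoop_eq (l : List String) :
    ∀ (KL : List String) (S : PySem.Set String) (D : PySem.Dict String Int),
      (∀ x, x ∈ S ↔ x ∈ KL) →
      D = KL.foldl (fun d f => d.insert f 1) PySem.Dict.empty →
      (l.foldl pvStepB (S, D)).2 =
        (l.foldl pvStepA KL).foldl (fun d f => d.insert f 1) PySem.Dict.empty := by
  induction l with
  | nil => intro KL S D hmem hD; simpa using hD
  | cons f rest ih =>
    intro KL S D hmem hD
    simp only [List.foldl_cons]
    rw [show pvStepB (S, D) f =
        (if pvHasKeptAncestor S [] f.toList then (S, D) else (S.add f, D.insert f 1)) from rfl]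
    rw [pvCond_eq S KL hmem f]
    unfold pvStepA
    split
    · exact ih KL S D hmem hD
    · apply ih (KL ++ [f]) (S.add f) (D.insert f 1)
      · intro x
        rw [PySem.Set.mem_add]
        simp [hmem x]
      · rw [List.foldl_append, ← hD]
        rfl

-- ===== VERDICT (by name: the statement is the Claim_ definition above) =====
theorem projection_py_spec : Claim_equal_projection_py := by
  intro fields _
  unfold Spec_projection_py projection_py projection_py_alt
  cases fields with
  | none => rfl
  | some fs =>
    by_cases h : fs.isEmpty
    · simp [h]
    · simp only [h, if_false, Bool.false_eq_true]
      have := pvLoop_eq (PySem.List.sorted fs (fun x => x) false) [] PySem.Set.empty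
        PySem.Dict.empty (by simp [PySem.Set.empty]) rfl
      rw [this]
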